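-- pv_equiv track=rewrite | github.com/Jasson-01/UBA-IP-2024 | Parciales_Python/Parcial-10-(2024-2C)/una_solucion.py | stock_productos
-- ===== SOURCE A (Python) =====
-- def stock_productos(stock_cambios:list[(str,int)]) -> dict[str, (int,int)]:
--     """
--     La clave debe ser el nombre del producto.
--     El valor debe ser una tupla con dos elementos:
--         El menor stock registrado en la pila para ese producto.
--         El mayor stock registrado en la pila para ese producto.
--     """
--     res: dict[str, (int,int)] = dict()
--
--     for (producto,cantidad) in stock_cambios:
--         if (producto in res):
--             cantidad_actual_menor:int = res[producto][0]
--             cantidad_actual_mayor:int = res[producto][1]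
--             if cantidad < cantidad_actual_menor:
--                 res[producto] = (cantidad, cantidad_actual_mayor)
--             elif cantidad > cantidad_actual_mayor:
--                 res[producto] = (cantidad_actual_menor, cantidad)
--         else:
--             res[producto] = (cantidad,cantidad)
--
--     return res
-- ===== SOURCE B (Python) =====
-- def stock_productos(stock_cambios: list[(str, int)]) -> dict[str, (int, int)]:
--     grupos: dict[str, list[int]] = {}
--     for (producto, cantidad) in stock_cambios:
--         grupos.setdefault(producto, []).append(cantidad)
--     return {producto: (min(cantidades), max(cantidades))
--             for producto, cantidades in grupos.items()}
-- ===== Notes on version B (the rewrite author's own statement) =====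
-- stated objective: alternative
-- what changed: Replaces the single pass with incremental running-min/max branch updates by a two-phase group-then-reduce: first build a dict mapping each product to the list of all its quantities, then map each group to (min, max).
import Mathlib
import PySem

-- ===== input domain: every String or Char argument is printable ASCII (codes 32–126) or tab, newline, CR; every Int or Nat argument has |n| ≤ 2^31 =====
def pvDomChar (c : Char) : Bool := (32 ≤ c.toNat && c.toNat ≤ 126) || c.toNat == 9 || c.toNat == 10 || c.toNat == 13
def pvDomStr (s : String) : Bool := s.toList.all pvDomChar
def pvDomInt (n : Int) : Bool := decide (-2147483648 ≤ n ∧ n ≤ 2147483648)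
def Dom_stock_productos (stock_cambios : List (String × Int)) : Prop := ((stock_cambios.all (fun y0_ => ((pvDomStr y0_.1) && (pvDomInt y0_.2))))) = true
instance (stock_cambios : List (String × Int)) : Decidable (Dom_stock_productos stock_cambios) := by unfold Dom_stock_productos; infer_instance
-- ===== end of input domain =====

-- B groups all quantities per product first, then maps each group to (min, max) — an alternative two-phase decomposition of A's single-pass running min/max.


-- ===== PORT A =====
-- one loop body step: the branchy running-min/max update of A
def stockStepA (res : PySem.Dict String (Int × Int)) (pc : String × Int) : PySem.Dict String (Int × Int) :=
  if res.contains pc.1 then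
    let cur := res.getD pc.1 (0, 0)   -- res[pc.1]: key present, so getD default unreachable
    if pc.2 < cur.1 then res.insert pc.1 (pc.2, cur.2)
    else if pc.2 > cur.2 then res.insert pc.1 (cur.1, pc.2)
    else res
  else res.insert pc.1 (pc.2, pc.2)

def stock_productos (stock_cambios : List (String × Int)) : List (String × Int × Int) :=
  (stock_cambios.foldl stockStepA PySem.Dict.empty).items

-- ===== PORT B =====
-- phase 1: group quantities per product (setdefault(p, []).append(c) = modify p [] (· ++ [c]))
def stockGroups (stock_cambios : List (String × Int)) : PySem.Dict String (List Int) :=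
  stock_cambios.foldl (fun d pc => d.modify pc.1 [] (fun qs => qs ++ [pc.2])) PySem.Dict.empty

-- phase 2: min/max of each group; groups are nonempty so the .getD 0 default is unreachable
def stock_productos_alt (stock_cambios : List (String × Int)) : List (String × Int × Int) :=
  (stockGroups stock_cambios).items.map
    (fun kv => (kv.1, ((PySem.List.min? kv.2 (fun x => x)).getD 0,
                       (PySem.List.max? kv.2 (fun x => x)).getD 0)))

-- ===== PRECONDITION & SPEC =====
def Spec_stock_productos (stock_cambios : List (String × Int)) (out : List (String × Int × Int)) : Prop := out = stock_productos_alt stock_cambios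
instance (stock_cambios : List (String × Int)) (out : List (String × Int × Int)) : Decidable (Spec_stock_productos stock_cambios out) := by unfold Spec_stock_productos; infer_instance

-- ===== CLAIM (what is proved, stated in full; the proofs are below) =====
def Claim_equal_stock_productos : Prop := ∀ (stock_cambios : List (String × Int)), Dom_stock_productos stock_cambios → Spec_stock_productos stock_cambios (stock_productos stock_cambios)

-- ===== LEMMAS AND PROOFS =====

-- A's running value per key, as a fold over that key's quantities
def stockUpd (o : Option (Int × Int)) (q : Int) : Option (Int × Int) :=
  match o with
  | none => some (q, q)
  | some (mn, mx) => if q < mn then some (q, mx) else if q > mx then some (mn, q) else some (mn, mx)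

def stockFoldA (l : List (String × Int)) (d : PySem.Dict String (Int × Int)) : PySem.Dict String (Int × Int) :=
  l.foldl stockStepA d

lemma get?_stockStepA (d : PySem.Dict String (Int × Int)) (pc : String × Int) (p : String) :
    (stockStepA d pc).get? p = if p = pc.1 then stockUpd (d.get? pc.1) pc.2 else d.get? p := by
  unfold stockStepA stockUpd
  rcases hc : d.get? pc.1 with _ | ⟨mn, mx⟩
  · have : d.contains pc.1 = false := by
      rw [PySem.Dict.contains_eq_isSome_get?, hc]; rfl
    simp [this, PySem.Dict.get?_insert]
  · have hct : d.contains pc.1 = true := by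
      rw [PySem.Dict.contains_eq_isSome_get?, hc]; rfl
    have hgd : d.getD pc.1 (0, 0) = (mn, mx) := PySem.Dict.getD_of_get?_eq_some _ _ hc
    simp only [hct, if_true, hgd]
    by_cases hp : p = pc.1
    · subst hp
      split_ifs <;> simp [hc] <;> simp_all
    · split_ifs <;> simp [PySem.Dict.get?_insert, hp]

lemma get?_stockFoldA (l : List (String × Int)) (d : PySem.Dict String (Int × Int)) (p : String) :
    (stockFoldA l d).get? p =
      ((l.filter (fun pr => pr.1 == p)).map (·.2)).foldl stockUpd (d.get? p) := by
  induction l generalizing d with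
  | nil => rfl
  | cons x t ih =>
    simp only [stockFoldA, List.foldl_cons, List.filter_cons]
    rw [show (t.foldl stockStepA (stockStepA d x)) = stockFoldA t (stockStepA d x) from rfl, ih]
    by_cases h : x.1 = p
    · subst h
      simp [get?_stockStepA]
    · have hb : (x.1 == p) = false := by simp [h]
      simp [hb, get?_stockStepA, Ne.symm h]

lemma keys_stockStepA (d : PySem.Dict String (Int × Int)) (pc : String × Int) :
    (stockStepA d pc).keys = PySem.Set.add d.keys pc.1 := by
  unfold stockStepA PySem.Set.add
  have hm : PySem.Set.contains d.keys pc.1 = d.contains pc.1 := by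
    simp [PySem.Set.contains, PySem.Dict.contains_eq_decide_mem_keys]
  rcases hc : d.contains pc.1 with _ | _
  · rw [hm, hc]
    simp [PySem.Dict.keys_insert_of_not_contains d _ hc]
  · rw [hm, hc]
    simp only [if_true]
    split_ifs <;> simp [PySem.Dict.keys_insert_of_contains d _ hc]

lemma keys_stockFoldA (l : List (String × Int)) (d : PySem.Dict String (Int × Int)) :
    (stockFoldA l d).keys = PySem.Set.update d.keys (l.map (·.1)) := by
  induction l generalizing d with
  | nil => rfl
  | cons x t ih =>
    simp only [stockFoldA, List.foldl_cons, List.map_cons, PySem.Set.update, List.foldl_cons]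
    rw [show (t.foldl stockStepA (stockStepA d x)) = stockFoldA t (stockStepA d x) from rfl, ih,
        keys_stockStepA]
    rfl

lemma nodup_keys_stockFoldA (l : List (String × Int)) (d : PySem.Dict String (Int × Int))
    (h : d.keys.Nodup) : (stockFoldA l d).keys.Nodup := by
  induction l generalizing d with
  | nil => exact h
  | cons x t ih =>
    refine ih _ ?_
    unfold stockStepA
    dsimp only
    split_ifs <;> first | exact PySem.Dict.nodup_keys_insert _ _ _ h | exact h

-- the branchy update is the running (min, max) pair, given mn ≤ mx
lemma foldl_stockUpd_some (qs : List Int) (mn mx : Int) (h : mn ≤ mx) :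
    qs.foldl stockUpd (some (mn, mx)) = some (qs.foldl min mn, qs.foldl max mx) := by
  induction qs generalizing mn mx with
  | nil => rfl
  | cons q t ih =>
    simp only [List.foldl_cons]
    have : stockUpd (some (mn, mx)) q = some (min mn q, max mx q) := by
      simp only [stockUpd]
      split_ifs <;> simp <;> omega
    rw [this, ih _ _ (by omega)]

lemma foldl_stockUpd_none (q : Int) (qs : List Int) :
    (q :: qs).foldl stockUpd none = some (qs.foldl min q, qs.foldl max q) := by
  simp only [List.foldl_cons]
  exact foldl_stockUpd_some qs q q le_rfl

lemma getD_stockGroups (l : List (String × Int)) (p : String) :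
    (stockGroups l).getD p [] = (l.filter (fun pr => pr.1 == p)).map (·.2) := by
  unfold stockGroups
  rw [PySem.Dict.getD_foldl_modify_append]
  simp

lemma keys_stockGroups (l : List (String × Int)) :
    (stockGroups l).keys = PySem.Set.ofList (l.map (·.1)) := by
  unfold stockGroups
  rw [PySem.Dict.keys_foldl_modify_key]
  rfl

lemma nodup_keys_stockGroups (l : List (String × Int)) : (stockGroups l).keys.Nodup := by
  unfold stockGroups
  exact PySem.Dict.nodup_keys_foldl_modify_key _ _ _ _ _ PySem.Dict.nodup_keys_empty

-- ===== VERDICT (by name: the statement is the Claim_ definition above) =====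
theorem stock_productos_spec : Claim_equal_stock_productos := by
  intro l _
  unfold Spec_stock_productos stock_productos stock_productos_alt
  have hA : (l.foldl stockStepA PySem.Dict.empty) = stockFoldA l PySem.Dict.empty := rfl
  rw [hA]
  rw [PySem.Dict.items_eq_map_keys _ (nodup_keys_stockFoldA l _ PySem.Dict.nodup_keys_empty) (0, 0),
      PySem.Dict.items_eq_map_keys _ (nodup_keys_stockGroups l) []]
  rw [keys_stockFoldA, keys_stockGroups, List.map_map]
  have hupd : PySem.Set.update (PySem.Dict.empty : PySem.Dict String (Int × Int)).keys (l.map (·.1))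
      = PySem.Set.ofList (l.map (·.1)) := rfl
  rw [hupd]
  refine List.map_congr_left ?_
  intro p hp
  have hpmem : p ∈ l.map (·.1) := (PySem.Set.mem_ofList _ _).mp hp
  -- the group of p is nonempty
  have hgrp : ∃ q qs, (l.filter (fun pr => pr.1 == p)).map (·.2) = q :: qs := by
    obtain ⟨pr, hpr, hfst⟩ := List.mem_map.mp hpmem
    have hmem : pr ∈ l.filter (fun pr => pr.1 == p) := by
      simp [List.mem_filter, hpr, hfst]
    rcases hfl : (l.filter (fun pr => pr.1 == p)).map (·.2) with _ | ⟨q, qs⟩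
    · have := List.mem_map_of_mem (f := (·.2)) hmem
      rw [hfl] at this
      exact absurd this (List.not_mem_nil)
    · exact ⟨q, qs, hfl⟩
  obtain ⟨q, qs, hg⟩ := hgrp
  have hAp : (stockFoldA l PySem.Dict.empty).getD p (0, 0) = (qs.foldl min q, qs.foldl max q) := by
    rw [PySem.Dict.getD_eq_get?_getD, get?_stockFoldA, PySem.Dict.get?_empty, hg,
        foldl_stockUpd_none]
    rfl
  have hBp : (stockGroups l).getD p [] = q :: qs := by rw [getD_stockGroups, hg]
  simp only [Function.comp_def]
  rw [hAp, hBp, PySem.List.min?_id_cons, PySem.List.max?_id_cons]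
  rfl
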